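-- pv_equiv track=rewrite | github.com/sahilgulati20/AI_Writer_buddy | copy-copy-writerbuddy/main.py | split_to_lines
-- ===== SOURCE A (Python) =====
-- def split_to_lines(text, max_words=8):
--     """Simple line breaker for SVG"""
--     words = text.split()
--     lines, current = [], []
--
--     for w in words:
--         current.append(w)
--         if len(current) >= max_words:
--             lines.append(" ".join(current))
--             current = []
--
--     if current:
--         lines.append(" ".join(current))
--
--     return lines
-- ===== SOURCE B (Python) =====
-- def split_to_lines(text, max_words=8):
--     """Simple line breaker for SVG"""
--     words = text.split()
--     return [" ".join(words[i:i + max_words]) for i in range(0, len(words), max_words)]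
-- ===== Notes on version B (the rewrite author's own statement) =====
-- stated objective: simpler
-- what changed: Replaces the accumulator-and-flush buffer loop with a single comprehension that slices the word list at chunk start indices range(0, len(words), max_words) and joins each slice.
-- outside the precondition, e.g. on split_to_lines('a b c', 0): A returns ['a', 'b', 'c'], B raises ValueError; on split_to_lines('a b c', -2): A returns ['a', 'b', 'c'], B returns []
import Mathlib
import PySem

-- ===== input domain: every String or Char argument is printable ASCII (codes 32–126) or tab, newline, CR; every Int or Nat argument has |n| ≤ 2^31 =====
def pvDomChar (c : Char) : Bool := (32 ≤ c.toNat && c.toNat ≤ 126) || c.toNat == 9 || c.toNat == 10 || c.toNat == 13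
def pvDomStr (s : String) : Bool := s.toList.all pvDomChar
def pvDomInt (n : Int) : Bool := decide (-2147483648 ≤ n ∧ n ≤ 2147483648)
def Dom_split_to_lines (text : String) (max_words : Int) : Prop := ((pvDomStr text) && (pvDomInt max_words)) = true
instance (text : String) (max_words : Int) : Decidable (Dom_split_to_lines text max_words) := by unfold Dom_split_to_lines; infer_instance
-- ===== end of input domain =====

-- B replaces A's accumulator-and-flush buffer loop with index-based slicing of the word list
-- at chunk start indices (simpler decomposition, same cost; equal on max_words ≥ 1).


-- ===== PORT A =====
def split_to_lines (text : String) (max_words : Int) : List String :=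
  let words := PySem.Str.split₀ text
  let s := words.foldl (fun (s : List String × List String) w =>
      let current := s.2 ++ [w]
      if max_words ≤ (current.length : Int) then (s.1 ++ [PySem.Str.join " " current], [])
      else (s.1, current)) ([], [])
  if s.2 = [] then s.1 else s.1 ++ [PySem.Str.join " " s.2]

-- ===== PORT B =====
def split_to_lines_alt (text : String) (max_words : Int) : List String :=
  let words := PySem.Str.split₀ text
  (PySem.List.pyRange 0 (words.length : Int) max_words).map
    (fun i => PySem.Str.join " " (PySem.List.slice words (some i) (some (i + max_words))))

-- ===== PRECONDITION & SPEC =====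
-- Pre_ excludes non-positive max_words, outside the natural domain of a words-per-line bound:
-- A accidentally emits one word per line there, while B's range(0, len(words), max_words)
-- raises ValueError at 0 and yields no chunks for a negative step.
def Pre_split_to_lines (text : String) (max_words : Int) : Prop := 1 ≤ max_words
instance (text : String) (max_words : Int) : Decidable (Pre_split_to_lines text max_words) := by unfold Pre_split_to_lines; infer_instance
def pvWitness_split_to_lines : String × Int := ("one two three", 2)
def Spec_split_to_lines (text : String) (max_words : Int) (out : List String) : Prop := out = split_to_lines_alt text max_words
instance (text : String) (max_words : Int) (out : List String) : Decidable (Spec_split_to_lines text max_words out) := by unfold Spec_split_to_lines; infer_instance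

-- ===== CLAIM (what is proved, stated in full; the proofs are below) =====
def Claim_equal_split_to_lines : Prop := ∀ (text : String) (max_words : Int), Dom_split_to_lines text max_words → Pre_split_to_lines text max_words → Spec_split_to_lines text max_words (split_to_lines text max_words)

-- ===== LEMMAS AND PROOFS =====

-- proof-only helper: the word list cut into consecutive chunks of k words
def chunksW (k : Nat) : List String → List (List String)
  | [] => []
  | w :: rest => (w :: rest.take (k - 1)) :: chunksW k (rest.drop (k - 1))
termination_by ws => ws.length
decreasing_by simp

lemma chunksW_nil (k : Nat) : chunksW k [] = [] := by rw [chunksW.eq_def]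

lemma chunksW_cons (k : Nat) (w : String) (rest : List String) :
    chunksW k (w :: rest) = (w :: rest.take (k - 1)) :: chunksW k (rest.drop (k - 1)) := by
  rw [chunksW.eq_def]

lemma chunksW_flush (k : Nat) (cur : List String) (w : String) (rest : List String)
    (h : cur.length + 1 = k) :
    chunksW k (cur ++ w :: rest) = (cur ++ [w]) :: chunksW k rest := by
  cases cur with
  | nil => simp at h; subst h; simp [chunksW_cons]
  | cons c cs =>
    have hk : k - 1 = cs.length + 1 := by simp at h; omega
    rw [List.cons_append, chunksW_cons, hk]
    rw [List.take_append, List.drop_append]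
    simp [List.drop_eq_nil_of_le (Nat.le_succ cs.length)]

-- A's buffer-and-flush loop (plus the final flush) produces exactly the k-chunks of cur ++ ws
lemma A_loop (k : Nat) (hk : 1 ≤ k) :
    ∀ (ws L cur : List String), cur.length < k →
      (let s := ws.foldl (fun (s : List String × List String) w =>
          let current := s.2 ++ [w]
          if (k : Int) ≤ (current.length : Int) then (s.1 ++ [PySem.Str.join " " current], [])
          else (s.1, current)) (L, cur);
        if s.2 = [] then s.1 else s.1 ++ [PySem.Str.join " " s.2])
      = L ++ (chunksW k (cur ++ ws)).map (PySem.Str.join " ") := by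
  intro ws
  induction ws with
  | nil =>
    intro L cur hcur
    cases cur with
    | nil => simp [chunksW_nil]
    | cons c cs =>
      have h1 : List.take (k - 1) cs = cs := List.take_of_length_le (by simp at hcur; omega)
      have h2 : List.drop (k - 1) cs = [] := List.drop_eq_nil_of_le (by simp at hcur; omega)
      simp [chunksW_cons, chunksW_nil, h1, h2]
  | cons w rest ih =>
    intro L cur hcur
    simp only [List.foldl_cons]
    by_cases hc : (k : Int) ≤ ((cur ++ [w]).length : Int)
    · have hlen : cur.length + 1 = k := by
        simp only [List.length_append, List.length_cons, List.length_nil] at hc; omega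
      rw [if_pos hc]
      have := ih (L ++ [PySem.Str.join " " (cur ++ [w])]) [] (by simp; omega)
      simp only [List.nil_append] at this
      rw [this, chunksW_flush k cur w rest hlen]
      simp
    · rw [if_neg hc]
      have hlen : (cur ++ [w]).length < k := by
        simp only [List.length_append, List.length_cons, List.length_nil] at hc ⊢; omega
      have := ih L (cur ++ [w]) hlen
      rw [this]
      simp

-- slicing at the start indices 0, k, 2k, … produces exactly the k-chunks
lemma range_chunks (k : Nat) (hk : 1 ≤ k) :
    ∀ (c : Nat) (ws : List String), ws.length ≤ c * k → c * k < ws.length + k →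
      (List.range c).map (fun j => (ws.drop (k * j)).take k) = chunksW k ws := by
  obtain ⟨k', rfl⟩ : ∃ k', k = k' + 1 := ⟨k - 1, by omega⟩
  intro c
  induction c with
  | zero =>
    intro ws h1 _
    have : ws = [] := List.eq_nil_of_length_eq_zero (by omega)
    simp [this, chunksW_nil]
  | succ c ih =>
    intro ws h1 h2
    have e : (c + 1) * (k' + 1) = c * (k' + 1) + (k' + 1) := by ring
    cases ws with
    | nil => exfalso; simp at h2; omega
    | cons w rest =>
      rw [List.range_succ_eq_map, chunksW_cons]
      simp only [List.map_cons, List.map_map]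
      refine congrArg₂ (· :: ·) ?_ ?_
      · simp [List.take_succ_cons]
      · have hstep : ∀ j : Nat, List.drop ((k' + 1) * (j + 1)) (w :: rest)
            = List.drop ((k' + 1) * j) (List.drop k' rest) := by
          intro j
          rw [List.drop_drop, show (k' + 1) * (j + 1) = ((k' + 1) * j + k') + 1 by ring,
              List.drop_succ_cons, Nat.add_comm]
        simp only [Function.comp_def, Nat.succ_eq_add_one, hstep]
        exact ih (rest.drop k') (by simp [List.length_drop]; simp at h1; omega)
          (by simp [List.length_drop]; simp at h2; omega)

-- range(0, n, k) has ceil(n/k) elements: its count c satisfies n ≤ c*k < n + k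
lemma count_bounds (k n : Nat) (hk : 1 ≤ k) :
    let c := (if (0:Int) < (n:Int) then (((n:Int) - 0 + (k:Int) - 1) / (k:Int)).toNat else 0)
    n ≤ c * k ∧ c * k < n + k := by
  intro c
  by_cases hn : (0:Int) < (n:Int)
  · have hn' : 1 ≤ n := by exact_mod_cast hn
    have hc : c = (n + k - 1) / k := by
      simp only [c, if_pos hn]
      have : ((n:Int) - 0 + (k:Int) - 1) = ((n + k - 1 : Nat) : Int) := by omega
      rw [this]
      simp [← Int.natCast_ediv]
    have h := Nat.div_add_mod (n + k - 1) k
    have hr : (n + k - 1) % k < k := Nat.mod_lt _ (by omega)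
    have hm : ((n + k - 1) / k) * k = k * ((n + k - 1) / k) := Nat.mul_comm _ _
    rw [hc]
    omega
  · have hn' : n = 0 := by omega
    simp [c, hn']
    omega

-- B's pyRange-and-slice map is the joined k-chunks
lemma B_chunks (k : Nat) (hk : 1 ≤ k) (ws : List String) :
    (PySem.List.pyRange 0 (ws.length : Int) (k : Int)).map
      (fun i => PySem.Str.join " " (PySem.List.slice ws (some i) (some (i + (k : Int)))))
    = (chunksW k ws).map (PySem.Str.join " ") := by
  rw [PySem.List.pyRange_of_pos _ _ (by exact_mod_cast hk), List.map_map]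
  have hel : ∀ j : Nat,
      PySem.Str.join " " (PySem.List.slice ws (some (0 + (k : Int) * (j : Int)))
        (some (0 + (k : Int) * (j : Int) + (k : Int))))
      = PySem.Str.join " " ((ws.drop (k * j)).take k) := by
    intro j
    have h1 : (0 + (k : Int) * (j : Int)) = ((k * j : Nat) : Int) := by push_cast; ring
    have h2 : (0 + (k : Int) * (j : Int) + (k : Int)) = ((k * j + k : Nat) : Int) := by push_cast; ring
    rw [h2, h1, PySem.List.slice_natCast, show k * j + k - (k * j) = k from by omega]
  simp only [Function.comp_def, hel]
  obtain ⟨hb1, hb2⟩ := count_bounds k ws.length hk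
  rw [← range_chunks k hk _ ws hb1 hb2, List.map_map]
  simp [Function.comp_def]

-- ===== VERDICT (by name: the statement is the Claim_ definition above) =====
theorem split_to_lines_spec : Claim_equal_split_to_lines := by
  intro text max_words _ hpre
  have hnn : 0 ≤ max_words := le_trans (by norm_num) hpre
  obtain ⟨k, rfl⟩ : ∃ k : Nat, max_words = (k : Int) :=
    ⟨max_words.toNat, (Int.toNat_of_nonneg hnn).symm⟩
  have hk : 1 ≤ k := by unfold Pre_split_to_lines at hpre; exact_mod_cast hpre
  show split_to_lines text _ = split_to_lines_alt text _
  simp only [split_to_lines, split_to_lines_alt]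
  rw [B_chunks k hk (PySem.Str.split₀ text)]
  simpa using A_loop k hk (PySem.Str.split₀ text) [] [] (by simpa using hk)
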